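-- pv_equiv track=rewrite | github.com/tarahmarie/sextant | compare_influence_cases.py | categorize_hapaxes
-- ===== SOURCE A (Python) =====
-- def categorize_hapaxes(hapaxes: set) -> dict:
--     """Categorize hapaxes into semantic groups."""
--     categories = {
--         'psychological': {
--             'consciousness', 'soul', 'spirit', 'mind', 'feeling', 'emotion',
--             'thought', 'desire', 'passion', 'fear', 'hope', 'despair', 'joy',
--             'sorrow', 'grief', 'pain', 'suffering', 'will', 'intention',
--             'meaning', 'truth', 'reality', 'illusion', 'self', 'identity',
--             'existence', 'life', 'death', 'fate', 'freedom', 'struggle',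
--             'revelation', 'awakening', 'transformation', 'crisis', 'anguish',
--             'agony', 'ecstasy', 'yearning', 'longing', 'overwrought',
--             'agitation', 'inwardly', 'outburst', 'turmoil', 'torment',
--         },
--         'generic_prose': {
--             'immediately', 'approached', 'descriptions', 'impossible',
--             'impression', 'positively', 'remarkably', 'surrounded',
--             'unexpected', 'conviction', 'withdrawn', 'statement',
--             'occasion', 'prepared', 'produced', 'slightly', 'covered',
--             'engaged', 'evident', 'pointed', 'subject', 'turning',
--         }
--     }
--
--     result = {}
--     for cat_name, cat_words in categories.items():
--         matches = hapaxes & cat_words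
--         result[cat_name] = matches
--
--     return result
-- ===== SOURCE B (Python) =====
-- PSYCH_WORDS = (
--     "consciousness soul spirit mind feeling emotion thought desire passion "
--     "fear hope despair joy sorrow grief pain suffering will intention "
--     "meaning truth reality illusion self identity existence life death "
--     "fate freedom struggle revelation awakening transformation crisis "
--     "anguish agony ecstasy yearning longing overwrought agitation "
--     "inwardly outburst turmoil torment"
-- ).split()
-- PROSE_WORDS = (
--     "immediately approached descriptions impossible impression positively "
--     "remarkably surrounded unexpected conviction withdrawn statement "
--     "occasion prepared produced slightly covered engaged evident pointed "
--     "subject turning"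
-- ).split()
--
-- # inverted index: word -> category name (the two category sets are disjoint)
-- WORD_INDEX = {w: 'psychological' for w in PSYCH_WORDS}
-- WORD_INDEX.update({w: 'generic_prose' for w in PROSE_WORDS})
--
--
-- def categorize_hapaxes(hapaxes: set) -> dict:
--     """Categorize hapaxes into semantic groups."""
--     result = {'psychological': set(), 'generic_prose': set()}
--     for w in hapaxes:
--         cat = WORD_INDEX.get(w)
--         if cat is not None:
--             result[cat].add(w)
--     return result
-- ===== Notes on version B (the rewrite author's own statement) =====
-- stated objective: idiomatic
-- what changed: Replaces the per-category set intersections with a single word-to-category inverted index built once from the two disjoint word lists (stored as split strings), filling both pre-initialised result buckets in one pass over the hapaxes.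
import Mathlib
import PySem

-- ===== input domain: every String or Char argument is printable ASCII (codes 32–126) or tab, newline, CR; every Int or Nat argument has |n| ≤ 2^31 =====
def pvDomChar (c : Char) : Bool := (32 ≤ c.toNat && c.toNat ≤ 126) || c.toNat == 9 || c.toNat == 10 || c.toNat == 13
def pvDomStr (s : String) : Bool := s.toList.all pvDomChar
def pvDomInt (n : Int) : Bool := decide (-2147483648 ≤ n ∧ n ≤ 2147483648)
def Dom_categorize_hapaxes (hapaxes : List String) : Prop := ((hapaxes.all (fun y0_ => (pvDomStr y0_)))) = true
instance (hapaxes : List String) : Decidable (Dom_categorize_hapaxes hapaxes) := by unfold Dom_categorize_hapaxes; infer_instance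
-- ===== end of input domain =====

-- B replaces A's loop of per-category set intersections by a single inverted word→category
-- index (built once from split word strings) consulted once per hapax (more idiomatic; no speed claim).

-- ===== PORT A =====
-- the two category word sets, in the source's literal order
def psychWords : List String :=
  ["consciousness", "soul", "spirit", "mind", "feeling", "emotion",
   "thought", "desire", "passion", "fear", "hope", "despair", "joy",
   "sorrow", "grief", "pain", "suffering", "will", "intention",
   "meaning", "truth", "reality", "illusion", "self", "identity",
   "existence", "life", "death", "fate", "freedom", "struggle",
   "revelation", "awakening", "transformation", "crisis", "anguish",
   "agony", "ecstasy", "yearning", "longing", "overwrought",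
   "agitation", "inwardly", "outburst", "turmoil", "torment"]

def proseWords : List String :=
  ["immediately", "approached", "descriptions", "impossible",
   "impression", "positively", "remarkably", "surrounded",
   "unexpected", "conviction", "withdrawn", "statement",
   "occasion", "prepared", "produced", "slightly", "covered",
   "engaged", "evident", "pointed", "subject", "turning"]

-- A: result = {}; for cat_name, cat_words in categories.items(): result[cat_name] = hapaxes & cat_words
-- (the set-typed parameter arrives as a list; set(hapaxes) = PySem.Set.ofList hapaxes)
def categorize_hapaxes (hapaxes : List String) : List (String × List String) :=
  (List.foldl
    (fun result c =>
      PySem.Dict.insert result c.1 (PySem.Set.inter (PySem.Set.ofList hapaxes) c.2))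
    PySem.Dict.empty
    [("psychological", psychWords), ("generic_prose", proseWords)]).items

-- ===== PORT B =====
-- Source B: PSYCH_WORDS = "...".split(); PROSE_WORDS = "...".split()
def psychWordsB : List String :=
  PySem.Str.split₀
    ("consciousness soul spirit mind feeling emotion thought desire passion " ++
     "fear hope despair joy sorrow grief pain suffering will intention " ++
     "meaning truth reality illusion self identity existence life death " ++
     "fate freedom struggle revelation awakening transformation crisis " ++
     "anguish agony ecstasy yearning longing overwrought agitation " ++
     "inwardly outburst turmoil torment")

def proseWordsB : List String :=
  PySem.Str.split₀
    ("immediately approached descriptions impossible impression positively " ++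
     "remarkably surrounded unexpected conviction withdrawn statement " ++
     "occasion prepared produced slightly covered engaged evident pointed " ++
     "subject turning")

-- WORD_INDEX = {w: 'psychological' for w in PSYCH_WORDS} then .update({w: 'generic_prose' for w in PROSE_WORDS});
-- exact as the appended pair lists because the 68 words are pairwise distinct (all keys fresh on insertion)
def wordIndex : PySem.Dict String String :=
  PySem.Dict.mk (psychWordsB.map (fun w => (w, "psychological")) ++
                 proseWordsB.map (fun w => (w, "generic_prose")))

-- B: result = {'psychological': set(), 'generic_prose': set()}; for w in hapaxes:
--      cat = WORD_INDEX.get(w); if cat is not None: result[cat].add(w)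
def categorize_hapaxes_alt (hapaxes : List String) : List (String × List String) :=
  (hapaxes.foldl
    (fun result w =>
      match PySem.Dict.get? wordIndex w with
      | some cat => PySem.Dict.modify result cat [] (fun s => PySem.Set.add s w)
      | none => result)
    (PySem.Dict.mk [("psychological", PySem.Set.empty), ("generic_prose", PySem.Set.empty)])).items

-- ===== PRECONDITION & SPEC =====
def Spec_categorize_hapaxes (hapaxes : List String) (out : List (String × List String)) : Prop := out = categorize_hapaxes_alt hapaxes
instance (hapaxes : List String) (out : List (String × List String)) : Decidable (Spec_categorize_hapaxes hapaxes out) := by unfold Spec_categorize_hapaxes; infer_instance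

-- ===== CLAIM (what is proved, stated in full; the proofs are below) =====
def Claim_equal_categorize_hapaxes : Prop := ∀ (hapaxes : List String), Dom_categorize_hapaxes hapaxes → Spec_categorize_hapaxes hapaxes (categorize_hapaxes hapaxes)

-- ===== LEMMAS AND PROOFS =====

-- B's split word strings yield exactly A's word lists
set_option maxRecDepth 100000 in
lemma psychB_eq : psychWordsB = psychWords := by decide
set_option maxRecDepth 100000 in
lemma proseB_eq : proseWordsB = proseWords := by decide

-- the two category word lists are disjoint
lemma prose_not_psych (w : String) (h : proseWords.contains w = true) :
    psychWords.contains w = false := by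
  have hall : proseWords.all (fun w => !psychWords.contains w) = true := by decide
  have hw : w ∈ proseWords := by simpa using h
  have := List.all_eq_true.mp hall w hw
  simpa using this

lemma find?_map_const (l : List String) (c w : String) :
    List.find? (fun p => p.1 == w) (l.map (fun x => (x, c)))
      = if l.contains w then some (w, c) else none := by
  induction l with
  | nil => simp
  | cons a t ih =>
      by_cases h : a = w
      · subst h; simp
      · simp [h, ih, Ne.symm h]

lemma get?_wordIndex (w : String) :
    PySem.Dict.get? wordIndex w
      = if psychWords.contains w then some "psychological"
        else if proseWords.contains w then some "generic_prose" else none := by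
  simp only [PySem.Dict.get?, wordIndex, psychB_eq, proseB_eq, List.find?_append, find?_map_const]
  by_cases h1 : w ∈ psychWords <;> by_cases h2 : w ∈ proseWords <;> simp [h1, h2]

lemma add_filter {α : Type} [BEq α] [LawfulBEq α] (s : List α) (a : α) (p : α → Bool) :
    (PySem.Set.add s a).filter p = if p a then PySem.Set.add (s.filter p) a else s.filter p := by
  by_cases hm : a ∈ s
  · by_cases hp : p a = true
    · have hmf : a ∈ s.filter p := List.mem_filter.mpr ⟨hm, hp⟩
      simp [PySem.Set.add, hm, hp, hmf]
    · simp [PySem.Set.add, hm, hp]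
  · have hmf : a ∉ s.filter p := fun h => hm (List.mem_filter.mp h).1
    by_cases hp : p a = true <;> simp [PySem.Set.add, hm, hp, hmf, List.filter_append]

lemma filter_foldl_add {α : Type} [BEq α] [LawfulBEq α] (h : List α) (p : α → Bool) :
    ∀ s : List α, (List.foldl PySem.Set.add s h).filter p
      = List.foldl PySem.Set.add (s.filter p) (h.filter p) := by
  induction h with
  | nil => intro s; simp
  | cons a t ih =>
      intro s
      by_cases hp : p a = true <;>
        simp [List.foldl_cons, ih, add_filter, hp]

lemma filter_ofList {α : Type} [BEq α] [LawfulBEq α] (h : List α) (p : α → Bool) :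
    (PySem.Set.ofList h).filter p = PySem.Set.ofList (h.filter p) := by
  simpa [PySem.Set.ofList, PySem.Set.empty] using filter_foldl_add h p []

-- Dict.modify on the fixed two-key result dict, bucket by bucket
lemma modify_psych (p g : List String) (f : List String → List String) :
    PySem.Dict.modify (PySem.Dict.mk [("psychological", p), ("generic_prose", g)]) "psychological" [] f
      = PySem.Dict.mk [("psychological", f p), ("generic_prose", g)] := by
  simp [PySem.Dict.modify, PySem.Dict.insert, PySem.Dict.getD, PySem.Dict.get?,
        PySem.Dict.contains]

lemma modify_prose (p g : List String) (f : List String → List String) :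
    PySem.Dict.modify (PySem.Dict.mk [("psychological", p), ("generic_prose", g)]) "generic_prose" [] f
      = PySem.Dict.mk [("psychological", p), ("generic_prose", f g)] := by
  simp [PySem.Dict.modify, PySem.Dict.insert, PySem.Dict.getD, PySem.Dict.get?,
        PySem.Dict.contains]

-- the one-pass loop of B, characterised bucket by bucket
lemma loopB (h : List String) : ∀ p g : List String,
    List.foldl
      (fun result w =>
        match PySem.Dict.get? wordIndex w with
        | some cat => PySem.Dict.modify result cat [] (fun s => PySem.Set.add s w)
        | none => result)
      (PySem.Dict.mk [("psychological", p), ("generic_prose", g)]) h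
    = PySem.Dict.mk [("psychological",
          List.foldl (fun s w => if psychWords.contains w then PySem.Set.add s w else s) p h),
       ("generic_prose",
          List.foldl (fun s w => if !psychWords.contains w && proseWords.contains w then PySem.Set.add s w else s) g h)] := by
  induction h with
  | nil => intro p g; simp
  | cons a t ih =>
      intro p g
      rw [List.foldl_cons, List.foldl_cons, List.foldl_cons, get?_wordIndex a]
      by_cases h1 : psychWords.contains a = true
      · rw [if_pos h1, if_pos h1, if_neg (by rw [h1]; simp)]
        rw [show (match some "psychological" with
              | some cat => PySem.Dict.modify (PySem.Dict.mk [("psychological", p), ("generic_prose", g)]) cat [] (fun s => PySem.Set.add s a)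
              | none => PySem.Dict.mk [("psychological", p), ("generic_prose", g)])
            = PySem.Dict.modify (PySem.Dict.mk [("psychological", p), ("generic_prose", g)]) "psychological" [] (fun s => PySem.Set.add s a) from rfl]
        rw [modify_psych, ih]
      · rw [if_neg h1, if_neg h1]
        by_cases h2 : proseWords.contains a = true
        · have h1' : psychWords.contains a = false := by revert h1; cases psychWords.contains a <;> simp
          rw [if_pos h2, if_pos (by rw [h1', h2]; rfl)]
          rw [show (match some "generic_prose" with
                | some cat => PySem.Dict.modify (PySem.Dict.mk [("psychological", p), ("generic_prose", g)]) cat [] (fun s => PySem.Set.add s a)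
                | none => PySem.Dict.mk [("psychological", p), ("generic_prose", g)])
              = PySem.Dict.modify (PySem.Dict.mk [("psychological", p), ("generic_prose", g)]) "generic_prose" [] (fun s => PySem.Set.add s a) from rfl]
          rw [modify_prose, ih]
        · have h2' : proseWords.contains a = false := by revert h2; cases proseWords.contains a <;> simp
          rw [if_neg h2, if_neg (by rw [h2']; simp)]
          exact ih p g

-- for membership tests the compound prose predicate collapses (disjointness)
lemma prose_pred_eq :
    (fun w => !psychWords.contains w && proseWords.contains w)
      = fun w => proseWords.contains w := by
  funext w
  by_cases h2 : proseWords.contains w = true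
  · rw [h2, prose_not_psych w h2]; rfl
  · have h2' : proseWords.contains w = false := Bool.eq_false_iff.mpr h2
    rw [h2', Bool.and_false]

-- ===== VERDICT (by name: the statement is the Claim_ definition above) =====
theorem categorize_hapaxes_spec : Claim_equal_categorize_hapaxes := by
  intro hapaxes _
  unfold Spec_categorize_hapaxes categorize_hapaxes categorize_hapaxes_alt
  rw [loopB]
  rw [PySem.List.foldl_if_eq_foldl_filter, PySem.List.foldl_if_eq_foldl_filter]
  simp only [List.foldl_cons, List.foldl_nil, PySem.Dict.insert, PySem.Dict.empty,
    PySem.Dict.contains, PySem.Set.inter, prose_pred_eq]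
  rw [filter_ofList, filter_ofList]
  simp [PySem.Set.ofList, PySem.Set.empty]
  have hpc : psychWords.contains = (fun x : String => decide (x ∈ psychWords)) := by
    funext x; simp
  rw [hpc]
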